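-- pv_equiv track=rewrite | github.com/dlwogus0128/2023-DM-Project | main.py | extract_patents_main_sub_ipc
-- ===== SOURCE A (Python) =====
-- def extract_patents_main_sub_ipc(ipc_list:list, start_idx:int, end_idx:int) -> list:
--     ipc_main_sub_list=[]
--     for ipcs in ipc_list:
--         ipc_list = []
--         for ipc_item in ipcs:
--             if len(ipc_list)!=0:
--                 if ipc_list[0]!=ipc_item[start_idx:end_idx]:
--                     ipc_list.append(ipc_item[start_idx:end_idx])
--                     break
--             else:
--                 ipc_list.append(ipc_item[start_idx:end_idx])
--         ipc_main_sub_list.append(ipc_list)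
--     return ipc_main_sub_list
-- ===== SOURCE B (Python) =====
-- def extract_patents_main_sub_ipc(ipc_list: list, start_idx: int, end_idx: int) -> list:
--     result = []
--     for ipcs in ipc_list:
--         prefixes = dict.fromkeys(item[start_idx:end_idx] for item in ipcs)
--         result.append(list(prefixes)[:2])
--     return result
-- ===== Notes on version B (the rewrite author's own statement) =====
-- stated objective: simpler
-- what changed: Replaces the hand-maintained one/two-element buffer with its early-break inner loop by an order-preserving dict.fromkeys dedup of all prefixes followed by a [:2] slice.
import Mathlib
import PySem

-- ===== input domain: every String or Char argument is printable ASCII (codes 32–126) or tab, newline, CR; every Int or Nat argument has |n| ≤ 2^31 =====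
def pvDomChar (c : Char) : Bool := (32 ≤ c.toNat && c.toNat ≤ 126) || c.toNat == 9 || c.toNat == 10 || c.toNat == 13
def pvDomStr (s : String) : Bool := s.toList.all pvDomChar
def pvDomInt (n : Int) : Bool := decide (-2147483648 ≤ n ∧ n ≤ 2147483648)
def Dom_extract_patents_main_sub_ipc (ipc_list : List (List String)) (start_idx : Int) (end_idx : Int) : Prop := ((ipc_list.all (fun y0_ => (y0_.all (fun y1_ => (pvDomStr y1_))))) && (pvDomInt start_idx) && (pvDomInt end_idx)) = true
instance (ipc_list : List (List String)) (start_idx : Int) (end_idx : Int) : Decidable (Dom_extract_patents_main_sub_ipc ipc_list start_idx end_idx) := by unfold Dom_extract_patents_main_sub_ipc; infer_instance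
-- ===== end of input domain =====

-- B replaces A's hand-maintained one/two-element buffer with its early-break inner loop
-- by an order-preserving dict.fromkeys dedup of the group's prefixes followed by a [:2] slice.

-- ===== PORT A =====
-- inner 'for ipc_item in ipcs' loop of A, with its early break; acc is A's inner ipc_list buffer
def extractInnerA (start_idx end_idx : Int) (acc : List String) : List String → List String
  | [] => acc
  | item :: rest =>
    if acc.length ≠ 0 then
      if acc.headI ≠ PySem.Str.slice item (some start_idx) (some end_idx) then
        acc ++ [PySem.Str.slice item (some start_idx) (some end_idx)]   -- break
      else
        extractInnerA start_idx end_idx acc rest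
    else
      extractInnerA start_idx end_idx (acc ++ [PySem.Str.slice item (some start_idx) (some end_idx)]) rest

def extract_patents_main_sub_ipc (ipc_list : List (List String)) (start_idx : Int) (end_idx : Int) : List (List String) :=
  ipc_list.foldl (fun ipc_main_sub_list ipcs =>
    ipc_main_sub_list ++ [extractInnerA start_idx end_idx [] ipcs]) []

-- ===== PORT B =====
def extract_patents_main_sub_ipc_alt (ipc_list : List (List String)) (start_idx : Int) (end_idx : Int) : List (List String) :=
  ipc_list.foldl (fun result ipcs =>
    result ++ [PySem.List.slice
      (PySem.List.dedup (ipcs.map (fun item => PySem.Str.slice item (some start_idx) (some end_idx))))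
      none (some 2)]) []

-- ===== PRECONDITION & SPEC =====
def Spec_extract_patents_main_sub_ipc (ipc_list : List (List String)) (start_idx : Int) (end_idx : Int) (out : List (List String)) : Prop := out = extract_patents_main_sub_ipc_alt ipc_list start_idx end_idx
instance (ipc_list : List (List String)) (start_idx : Int) (end_idx : Int) (out : List (List String)) : Decidable (Spec_extract_patents_main_sub_ipc ipc_list start_idx end_idx out) := by unfold Spec_extract_patents_main_sub_ipc; infer_instance

-- ===== CLAIM (what is proved, stated in full; the proofs are below) =====
def Claim_equal_extract_patents_main_sub_ipc : Prop := ∀ (ipc_list : List (List String)) (start_idx : Int) (end_idx : Int), Dom_extract_patents_main_sub_ipc ipc_list start_idx end_idx → Spec_extract_patents_main_sub_ipc ipc_list start_idx end_idx (extract_patents_main_sub_ipc ipc_list start_idx end_idx)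

-- ===== LEMMAS AND PROOFS =====

-- once the accumulator has ≥ 2 elements, further Set.add's don't change its first two elements
lemma take2_foldl_add (l : List String) : ∀ (acc : List String), 2 ≤ acc.length →
    (l.foldl PySem.Set.add acc).take 2 = acc.take 2 := by
  induction l with
  | nil => intro acc _; rfl
  | cons x xs ih =>
    intro acc h
    by_cases hm : x ∈ acc
    · have ha : PySem.Set.add acc x = acc := by simp [PySem.Set.add, hm]
      rw [List.foldl_cons, ha, ih _ h]
    · have ha : PySem.Set.add acc x = acc ++ [x] := by simp [PySem.Set.add, hm]
      rw [List.foldl_cons, ha, ih _ (by simp; omega), List.take_append_of_le_length h]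

-- the inner loop with a one-element buffer [p] equals take 2 of the dedup fold from [p]
lemma innerA_one (s e : Int) (p : String) (xs : List String) :
    extractInnerA s e [p] xs
      = ((xs.map (fun item => PySem.Str.slice item (some s) (some e))).foldl PySem.Set.add [p]).take 2 := by
  induction xs with
  | nil => rfl
  | cons x xs ih =>
    simp only [extractInnerA, List.map_cons, List.foldl_cons]
    by_cases h : p = PySem.Str.slice x (some s) (some e)
    · have hadd : PySem.Set.add [p] (PySem.Str.slice x (some s) (some e)) = [p] := by
        simp [PySem.Set.add, ← h]
      rw [hadd, ← ih]
      simp [← h]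
    · have hadd : PySem.Set.add [p] (PySem.Str.slice x (some s) (some e))
          = [p, PySem.Str.slice x (some s) (some e)] := by
        simp [PySem.Set.add, Ne.symm h]
      rw [if_pos (by simp : ¬([p] : List String).length = 0), if_pos (by simpa using h), hadd,
        take2_foldl_add _ _ (by simp)]
      rfl

-- per-group equality: A's inner loop = first two entries of the ordered dedup of the prefixes
lemma inner_eq (s e : Int) (ipcs : List String) :
    extractInnerA s e [] ipcs
      = PySem.List.slice
          (PySem.List.dedup (ipcs.map (fun item => PySem.Str.slice item (some s) (some e))))
          none (some 2) := by
  rw [PySem.List.slice_to (hb := by norm_num)]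
  have h2 : (2 : Int).toNat = 2 := rfl
  rw [h2]
  cases ipcs with
  | nil => rfl
  | cons x xs =>
    simp only [extractInnerA, List.length_nil, ne_eq, not_true_eq_false, if_false,
      List.nil_append, List.map_cons]
    rw [innerA_one]
    have hd : PySem.List.dedup
        (PySem.Str.slice x (some s) (some e) :: xs.map (fun item => PySem.Str.slice item (some s) (some e)))
        = (xs.map (fun item => PySem.Str.slice item (some s) (some e))).foldl PySem.Set.add
            [PySem.Str.slice x (some s) (some e)] := by
      rw [PySem.List.dedup_eq_ofList, PySem.Set.ofList_eq_foldl]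
      rfl
    rw [hd]

-- ===== VERDICT (by name: the statement is the Claim_ definition above) =====
theorem extract_patents_main_sub_ipc_spec : Claim_equal_extract_patents_main_sub_ipc := by
  intro ipc_list s e _
  unfold Spec_extract_patents_main_sub_ipc extract_patents_main_sub_ipc extract_patents_main_sub_ipc_alt
  induction ipc_list using List.reverseRecOn with
  | nil => rfl
  | append_singleton xs x ih => simp [inner_eq]
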